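-- pv_equiv track=rewrite | github.com/nnZoey/cicd-playground | scripts/ci_test.py | extract_failed_tests
-- ===== SOURCE A (Python) =====
-- def extract_failed_tests(output):
--     """Extract failed test cases from pytest output and format details."""
--     failed_tests = []
--     failed_summary = []
--
--     capturing = False
--     for line in output.split("\n"):
--         if line.startswith("FAILED "):  # Pytest marks failed tests with "FAILED"
--             failed_tests.append(line.strip())
--             capturing = True  # Start capturing details
--             failed_summary.append(f"**{line.strip()}**")
--         elif capturing and line.strip():  # Capture assertion errors
--             failed_summary.append(f"> {line.strip()}")
--         else:
--             capturing = False  # Stop capturing on blank lines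
--
--     return failed_tests, "\n".join(failed_summary)
-- ===== SOURCE B (Python) =====
-- def extract_failed_tests(output):
--     """Extract failed test cases from pytest output and format details."""
--     lines = output.split("\n")
--     n = len(lines)
--     failed_tests = []
--     failed_summary = []
--     i = 0
--     while i < n:
--         line = lines[i]
--         if line.startswith("FAILED "):
--             t = line.strip()
--             failed_tests.append(t)
--             failed_summary.append(f"**{t}**")
--             j = i + 1
--             while j < n and lines[j].strip() and not lines[j].startswith("FAILED "):
--                 failed_summary.append("> " + lines[j].strip())
--                 j += 1
--             i = j
--         else:
--             i += 1
--     return failed_tests, "\n".join(failed_summary)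
-- ===== Notes on version B (the rewrite author's own statement) =====
-- stated objective: alternative
-- what changed: Replaced the capturing-flag state machine over all lines by an index-driven nested scan: an outer while-loop jumps from FAILED line to FAILED line and an inner while-loop collects the detail block that follows each one, so no boolean capture state is carried between lines.
import Mathlib
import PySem

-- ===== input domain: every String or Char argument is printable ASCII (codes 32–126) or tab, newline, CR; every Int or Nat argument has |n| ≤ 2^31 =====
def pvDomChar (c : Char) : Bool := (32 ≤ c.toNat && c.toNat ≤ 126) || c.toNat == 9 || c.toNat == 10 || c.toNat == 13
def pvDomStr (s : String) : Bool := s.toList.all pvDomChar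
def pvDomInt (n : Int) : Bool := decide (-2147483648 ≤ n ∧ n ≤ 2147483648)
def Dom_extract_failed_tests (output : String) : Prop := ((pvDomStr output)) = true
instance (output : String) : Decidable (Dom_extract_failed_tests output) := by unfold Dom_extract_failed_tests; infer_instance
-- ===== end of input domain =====

-- B replaces A's capturing-flag state machine by an index-driven nested scan (outer loop over
-- FAILED lines, inner loop over the detail block after each); same cost, no carried flag.

-- ===== PORT A =====
-- one iteration of A's for-loop; state = (failed_tests, failed_summary, capturing)
def aStep (st : List String × List String × Bool) (line : String) :
    List String × List String × Bool :=
  if PySem.Str.startswith line "FAILED " = true then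
    (st.1 ++ [PySem.Str.strip line],
     (st.2.1 ++ ["**" ++ PySem.Str.strip line ++ "**"], true))
  else if st.2.2 = true ∧ PySem.Str.strip line ≠ "" then
    (st.1, (st.2.1 ++ ["> " ++ PySem.Str.strip line], st.2.2))
  else
    (st.1, (st.2.1, false))

def extract_failed_tests (output : String) : List String × String :=
  let lines := (PySem.Str.split? output "\n").getD []   -- split? is some: sep "\n" ≠ ""
  let st := lines.foldl aStep ([], ([], false))
  (st.1, PySem.Str.join "\n" st.2.1)

-- ===== PORT B =====
-- inner while-loop: collects the '> …' detail lines from index j on; returns (final j, summary)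
def bInner (lines : List String) (n j : Nat) (fs : List String) : Nat × List String :=
  if _h : j < n then
    if PySem.Str.strip (lines.getD j "") ≠ "" ∧
        ¬ PySem.Str.startswith (lines.getD j "") "FAILED " = true then
      bInner lines n (j + 1) (fs ++ ["> " ++ PySem.Str.strip (lines.getD j "")])
    else (j, fs)
  else (j, fs)
termination_by n - j

-- needed by bOuter's termination proof
theorem bInner_fst_le (lines : List String) (n j : Nat) (fs : List String) :
    j ≤ (bInner lines n j fs).1 := by
  fun_induction bInner with
  | case1 => omega
  | case2 => omega
  | case3 => omega

-- outer while-loop over i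
def bOuter (lines : List String) (n i : Nat) (ft fs : List String) :
    List String × List String :=
  if h : i < n then
    if PySem.Str.startswith (lines.getD i "") "FAILED " = true then
      let p := bInner lines n (i + 1)
        (fs ++ ["**" ++ PySem.Str.strip (lines.getD i "") ++ "**"])
      bOuter lines n p.1 (ft ++ [PySem.Str.strip (lines.getD i "")]) p.2
    else bOuter lines n (i + 1) ft fs
  else (ft, fs)
termination_by n - i
decreasing_by
  · have := bInner_fst_le lines n (i + 1)
      (fs ++ ["**" ++ PySem.Str.strip (lines.getD i "") ++ "**"])
    omega
  · omega

def extract_failed_tests_alt (output : String) : List String × String :=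
  let lines := (PySem.Str.split? output "\n").getD []   -- split? is some: sep "\n" ≠ ""
  let p := bOuter lines lines.length 0 [] []
  (p.1, PySem.Str.join "\n" p.2)

-- ===== PRECONDITION & SPEC =====
def Spec_extract_failed_tests (output : String) (out : List String × String) : Prop := out = extract_failed_tests_alt output
instance (output : String) (out : List String × String) : Decidable (Spec_extract_failed_tests output out) := by unfold Spec_extract_failed_tests; infer_instance

-- ===== CLAIM (what is proved, stated in full; the proofs are below) =====
def Claim_equal_extract_failed_tests : Prop := ∀ (output : String), Dom_extract_failed_tests output → Spec_extract_failed_tests output (extract_failed_tests output)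

-- ===== LEMMAS AND PROOFS =====

theorem aStep_failed (ft fs : List String) (c : Bool) (line : String)
    (hF : PySem.Str.startswith line "FAILED " = true) :
    aStep (ft, (fs, c)) line =
      (ft ++ [PySem.Str.strip line],
       (fs ++ ["**" ++ PySem.Str.strip line ++ "**"], true)) := by
  simp only [aStep]
  rw [if_pos hF]

theorem aStep_false (ft fs : List String) (line : String)
    (hF : ¬ PySem.Str.startswith line "FAILED " = true) :
    aStep (ft, (fs, false)) line = (ft, (fs, false)) := by
  simp only [aStep]
  rw [if_neg hF, if_neg (by simp)]

theorem aStep_detail (ft fs : List String) (line : String)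
    (hF : ¬ PySem.Str.startswith line "FAILED " = true)
    (hS : PySem.Str.strip line ≠ "") :
    aStep (ft, (fs, true)) line =
      (ft, (fs ++ ["> " ++ PySem.Str.strip line], true)) := by
  simp only [aStep]
  rw [if_neg hF, if_pos ⟨by simp, hS⟩]

theorem aStep_blank (ft fs : List String) (line : String)
    (hF : ¬ PySem.Str.startswith line "FAILED " = true)
    (hS : PySem.Str.strip line = "") :
    aStep (ft, (fs, true)) line = (ft, (fs, false)) := by
  simp only [aStep]
  rw [if_neg hF, if_neg (fun h => h.2 hS)]

-- Joint invariant: resuming A's fold on the suffix from i with capturing = false is B's outer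
-- loop from i, and with capturing = true it is the inner loop from i followed by the outer loop.
theorem fold_eq_scan (lines : List String) (k : Nat) :
    ∀ i, lines.length - i ≤ k → ∀ ft fs,
      ((((lines.drop i).foldl aStep (ft, (fs, false))).1,
        ((lines.drop i).foldl aStep (ft, (fs, false))).2.1) =
          bOuter lines lines.length i ft fs)
      ∧
      ((((lines.drop i).foldl aStep (ft, (fs, true))).1,
        ((lines.drop i).foldl aStep (ft, (fs, true))).2.1) =
          bOuter lines lines.length (bInner lines lines.length i fs).1 ft
            (bInner lines lines.length i fs).2) := by
  induction k with
  | zero =>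
    intro i hi ft fs
    have hnlt : ¬ i < lines.length := by omega
    rw [List.drop_eq_nil_of_le (by omega), bInner, bOuter]
    simp [hnlt, bOuter, List.foldl]
  | succ k ih =>
    intro i hi ft fs
    by_cases hlt : i < lines.length
    · have hd : lines.drop i = lines[i] :: lines.drop (i + 1) :=
        List.drop_eq_getElem_cons hlt
      have hgd : lines.getD i "" = lines[i] := List.getD_eq_getElem lines "" hlt
      have hk : lines.length - (i + 1) ≤ k := by omega
      by_cases hF : PySem.Str.startswith lines[i] "FAILED " = true
      · constructor
        · rw [hd, List.foldl_cons, aStep_failed _ _ _ _ hF, bOuter, dif_pos hlt, hgd,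
            if_pos hF]
          exact (ih (i + 1) hk _ _).2
        · rw [hd, List.foldl_cons, aStep_failed _ _ _ _ hF,
            bInner, dif_pos hlt, hgd, if_neg (fun h => h.2 hF),
            bOuter, dif_pos hlt, hgd, if_pos hF]
          exact (ih (i + 1) hk _ _).2
      · by_cases hS : PySem.Str.strip lines[i] = ""
        · constructor
          · rw [hd, List.foldl_cons, aStep_false _ _ _ hF, bOuter, dif_pos hlt, hgd,
              if_neg hF]
            exact (ih (i + 1) hk _ _).1
          · rw [hd, List.foldl_cons, aStep_blank _ _ _ hF hS,
              bInner, dif_pos hlt, hgd, if_neg (fun h => h.1 hS),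
              bOuter, dif_pos hlt, hgd, if_neg hF]
            exact (ih (i + 1) hk _ _).1
        · constructor
          · rw [hd, List.foldl_cons, aStep_false _ _ _ hF, bOuter, dif_pos hlt, hgd,
              if_neg hF]
            exact (ih (i + 1) hk _ _).1
          · rw [hd, List.foldl_cons, aStep_detail _ _ _ hF hS,
              bInner, dif_pos hlt, hgd, if_pos ⟨hS, hF⟩]
            exact (ih (i + 1) hk _ _).2
    · have hnlt : ¬ i < lines.length := hlt
      rw [List.drop_eq_nil_of_le (by omega), bInner, bOuter]
      simp [hnlt, bOuter, List.foldl]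

-- ===== VERDICT (by name: the statement is the Claim_ definition above) =====
theorem extract_failed_tests_spec : Claim_equal_extract_failed_tests := by
  intro output _
  unfold Spec_extract_failed_tests
  have h := (fold_eq_scan ((PySem.Str.split? output "\n").getD [])
      ((PySem.Str.split? output "\n").getD []).length 0 (by omega) [] []).1
  simp only [List.drop_zero] at h
  show ((List.foldl aStep ([], ([], false)) ((PySem.Str.split? output "\n").getD [])).1,
      PySem.Str.join "\n"
        (List.foldl aStep ([], ([], false)) ((PySem.Str.split? output "\n").getD [])).2.1) =
    ((bOuter ((PySem.Str.split? output "\n").getD [])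
        ((PySem.Str.split? output "\n").getD []).length 0 [] []).1,
      PySem.Str.join "\n"
        (bOuter ((PySem.Str.split? output "\n").getD [])
          ((PySem.Str.split? output "\n").getD []).length 0 [] []).2)
  rw [← h]
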